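-- pv_equiv track=rewrite | github.com/vicre/api.security.ait.dtu.dk | app-main/myview/models.py | _split_distinguished_name
-- ===== SOURCE A (Python) =====
-- def _split_distinguished_name(distinguished_name):
--     """Split a distinguished name into domain parts, OU parts and CN."""
--     if not distinguished_name:
--         return [], [], None
--
--     domain_parts = []
--     organizational_units = []
--     common_name = None
--
--     for component in distinguished_name.split(','):
--         key, _, value = component.strip().partition('=')
--         if not key or not value:
--             continue
--
--         key = key.upper()
--         if key == 'DC':
--             domain_parts.append(value)
--         elif key == 'OU':
--             organizational_units.append(value)
--         elif key == 'CN':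
--             common_name = value
--
--     return domain_parts, organizational_units, common_name
-- ===== SOURCE B (Python) =====
-- def _split_distinguished_name(distinguished_name):
--     """Split a distinguished name into domain parts, OU parts and CN."""
--     if not distinguished_name:
--         return [], [], None
--
--     pairs = []
--     for component in distinguished_name.split(','):
--         key, _, value = component.strip().partition('=')
--         if key and value:
--             pairs.append((key.upper(), value))
--
--     domain_parts = [v for k, v in pairs if k == 'DC']
--     organizational_units = [v for k, v in pairs if k == 'OU']
--     cns = [v for k, v in pairs if k == 'CN']
--     common_name = cns[-1] if cns else None
--     return domain_parts, organizational_units, common_name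
-- ===== Notes on version B (the rewrite author's own statement) =====
-- stated objective: alternative
-- what changed: Replaces A's single loop with three branch accumulators by a parse phase producing a (KEY, value) pair list and a derivation phase of three comprehensions plus last-element lookup for CN.
import Mathlib
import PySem

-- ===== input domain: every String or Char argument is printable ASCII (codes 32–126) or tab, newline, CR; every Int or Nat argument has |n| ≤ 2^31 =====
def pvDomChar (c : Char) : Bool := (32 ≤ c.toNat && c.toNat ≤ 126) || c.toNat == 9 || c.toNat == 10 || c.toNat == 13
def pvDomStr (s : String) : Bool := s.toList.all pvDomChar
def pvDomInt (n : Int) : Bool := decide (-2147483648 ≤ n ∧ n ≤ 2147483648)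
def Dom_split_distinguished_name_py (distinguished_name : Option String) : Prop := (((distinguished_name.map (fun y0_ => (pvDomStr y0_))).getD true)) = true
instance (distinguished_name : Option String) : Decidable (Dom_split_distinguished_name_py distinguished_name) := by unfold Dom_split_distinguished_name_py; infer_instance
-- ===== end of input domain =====

-- B restructures A's single loop (three branch accumulators + CN overwrite) into a parse phase building a (KEY, value) list and a derivation phase of three filters with last-CN lookup; same cost, different decomposition.

-- shared helper: s.partition('=') ported by hand, exact for the one-char separator '='
-- (key = chars before the first '='; if no '=' occurs, Python returns (s, '', ''))
def pyPartitionEq (s : String) : String × String × String :=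
  let cs := s.toList
  let key := cs.takeWhile (fun c => c ≠ '=')
  if key.length = cs.length then (s, "", "")
  else (String.ofList key, "=", String.ofList (cs.drop (key.length + 1)))

-- ===== PORT A =====
def splitA_step (st : List String × List String × Option String) (component : String) :
    List String × List String × Option String :=
  let p := pyPartitionEq (PySem.Str.strip component)
  let key := p.1
  let value := p.2.2
  if key = "" ∨ value = "" then st
  else
    let key := PySem.Str.upper key
    if key = "DC" then (st.1 ++ [value], st.2.1, st.2.2)
    else if key = "OU" then (st.1, st.2.1 ++ [value], st.2.2)
    else if key = "CN" then (st.1, st.2.1, some value)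
    else st

def split_distinguished_name_py (distinguished_name : Option String) : List String × List String × Option String :=
  match distinguished_name with
  | none => ([], [], none)
  | some s =>
    if s = "" then ([], [], none)
    else ((PySem.Str.split? s ",").getD []).foldl splitA_step ([], [], none)

-- ===== PORT B =====
def splitB_pairs (comps : List String) : List (String × String) :=
  comps.foldl (fun acc component =>
    let p := pyPartitionEq (PySem.Str.strip component)
    if p.1 ≠ "" ∧ p.2.2 ≠ "" then acc ++ [(PySem.Str.upper p.1, p.2.2)] else acc) []

def split_distinguished_name_py_alt (distinguished_name : Option String) : List String × List String × Option String :=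
  match distinguished_name with
  | none => ([], [], none)
  | some s =>
    if s = "" then ([], [], none)
    else
      let pairs := splitB_pairs ((PySem.Str.split? s ",").getD [])
      ((pairs.filter (fun p => p.1 = "DC")).map Prod.snd,
       (pairs.filter (fun p => p.1 = "OU")).map Prod.snd,
       ((pairs.filter (fun p => p.1 = "CN")).map Prod.snd).getLast?)

-- ===== PRECONDITION & SPEC =====
def Spec_split_distinguished_name_py (distinguished_name : Option String) (out : List String × List String × Option String) : Prop := out = split_distinguished_name_py_alt distinguished_name
instance (distinguished_name : Option String) (out : List String × List String × Option String) : Decidable (Spec_split_distinguished_name_py distinguished_name out) := by unfold Spec_split_distinguished_name_py; infer_instance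

-- ===== CLAIM (what is proved, stated in full; the proofs are below) =====
def Claim_equal_split_distinguished_name_py : Prop := ∀ (distinguished_name : Option String), Dom_split_distinguished_name_py distinguished_name → Spec_split_distinguished_name_py distinguished_name (split_distinguished_name_py distinguished_name)

-- ===== LEMMAS AND PROOFS =====

def pvParse? (component : String) : Option (String × String) :=
  let p := pyPartitionEq (PySem.Str.strip component)
  if p.1 ≠ "" ∧ p.2.2 ≠ "" then some (PySem.Str.upper p.1, p.2.2) else none

theorem splitB_step_eq (acc : List (String × String)) (component : String) :
    (let p := pyPartitionEq (PySem.Str.strip component)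
     if p.1 ≠ "" ∧ p.2.2 ≠ "" then acc ++ [(PySem.Str.upper p.1, p.2.2)] else acc)
    = acc ++ (pvParse? component).toList := by
  unfold pvParse?
  by_cases h : (pyPartitionEq (PySem.Str.strip component)).1 ≠ "" ∧ (pyPartitionEq (PySem.Str.strip component)).2.2 ≠ ""
  · simp only [if_pos h, Option.toList_some]
  · simp only [if_neg h, Option.toList_none, List.append_nil]

theorem splitB_pairs_go (comps : List String) (acc : List (String × String)) :
    comps.foldl (fun acc component =>
      let p := pyPartitionEq (PySem.Str.strip component)
      if p.1 ≠ "" ∧ p.2.2 ≠ "" then acc ++ [(PySem.Str.upper p.1, p.2.2)] else acc) acc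
    = acc ++ comps.filterMap pvParse? := by
  induction comps generalizing acc with
  | nil => simp
  | cons c cs ih =>
    rw [List.foldl_cons, splitB_step_eq, ih, List.filterMap_cons]
    cases pvParse? c <;> simp

theorem splitB_pairs_eq (comps : List String) :
    splitB_pairs comps = comps.filterMap pvParse? := by
  simpa [splitB_pairs] using splitB_pairs_go comps []

theorem splitA_step_eq (st : List String × List String × Option String) (component : String) :
    splitA_step st component =
      match pvParse? component with
      | none => st
      | some (k, v) =>
        if k = "DC" then (st.1 ++ [v], st.2.1, st.2.2)
        else if k = "OU" then (st.1, st.2.1 ++ [v], st.2.2)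
        else if k = "CN" then (st.1, st.2.1, some v)
        else st := by
  unfold splitA_step pvParse?
  by_cases h : (pyPartitionEq (PySem.Str.strip component)).1 = "" ∨ (pyPartitionEq (PySem.Str.strip component)).2.2 = ""
  · have h' : ¬ ((pyPartitionEq (PySem.Str.strip component)).1 ≠ "" ∧ (pyPartitionEq (PySem.Str.strip component)).2.2 ≠ "") :=
      fun hc => h.elim hc.1 hc.2
    simp only [if_pos h, if_neg h']
  · have h' : (pyPartitionEq (PySem.Str.strip component)).1 ≠ "" ∧ (pyPartitionEq (PySem.Str.strip component)).2.2 ≠ "" :=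
      ⟨fun ha => h (Or.inl ha), fun hb => h (Or.inr hb)⟩
    simp only [if_neg h, if_pos h']

theorem foldl_choose_last {α : Type} (l : List α) (init : Option α) :
    l.foldl (fun _ v => some v) init
      = match l.getLast? with | some x => some x | none => init := by
  induction l generalizing init with
  | nil => simp
  | cons a t ih =>
    rw [List.foldl_cons, ih]
    cases t with
    | nil => simp
    | cons b bs =>
      rw [List.getLast?_cons_cons]
      cases h : (b :: bs).getLast? with
      | none => exact absurd h (by simp)
      | some x => rfl

theorem splitA_foldl (comps : List String) (dc ou : List String) (cn : Option String) :
    comps.foldl splitA_step (dc, ou, cn)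
    = (dc ++ ((comps.filterMap pvParse?).filter (fun p => p.1 = "DC")).map Prod.snd,
       ou ++ ((comps.filterMap pvParse?).filter (fun p => p.1 = "OU")).map Prod.snd,
       (((comps.filterMap pvParse?).filter (fun p => p.1 = "CN")).map Prod.snd).foldl (fun _ v => some v) cn) := by
  induction comps generalizing dc ou cn with
  | nil => simp
  | cons c cs ih =>
    rw [List.foldl_cons, splitA_step_eq, List.filterMap_cons]
    cases hp : pvParse? c with
    | none => exact ih dc ou cn
    | some kv =>
      obtain ⟨k, v⟩ := kv
      by_cases hdc : k = "DC"
      · simp only [hdc, List.filter_cons, decide_eq_true_eq]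
        rw [ih]
        simp
      · by_cases hou : k = "OU"
        · simp only [hou, List.filter_cons, decide_eq_true_eq]
          rw [ih]
          simp
        · by_cases hcn : k = "CN"
          · simp only [hcn, List.filter_cons, decide_eq_true_eq]
            rw [ih]
            simp [List.foldl_cons]
          · simp only [if_neg hdc, if_neg hou, if_neg hcn, List.filter_cons, decide_eq_true_eq]
            rw [ih]

-- ===== VERDICT (by name: the statement is the Claim_ definition above) =====
theorem split_distinguished_name_py_spec : Claim_equal_split_distinguished_name_py := by
  intro dn _
  unfold Spec_split_distinguished_name_py split_distinguished_name_py split_distinguished_name_py_alt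
  cases dn with
  | none => rfl
  | some s =>
    by_cases hs : s = ""
    · simp [hs]
    · simp only [if_neg hs, splitB_pairs_eq]
      rw [splitA_foldl, foldl_choose_last]
      cases ((((((PySem.Str.split? s ",").getD []).filterMap pvParse?).filter (fun p => p.1 = "CN")).map Prod.snd)).getLast? <;> rfl
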